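-- pv_equiv track=rewrite | github.com/xer0times/SQLi-Query-Tampering | tamper.py | charunicodeencode
-- ===== SOURCE A (Python) =====
-- import string
--
-- def charunicodeencode(payload, **kwargs):
--     """
--     Unicode-URL-encodes all characters in a given payload (not processing already encoded) (e.g. SELECT -> %u0053%u0045%u004C%u0045%u0043%u0054)
--     Requirement:
--         * ASP
--         * ASP.NET
--     Tested against:
--         * Microsoft SQL Server 2000
--         * Microsoft SQL Server 2005
--         * MySQL 5.1.56
--         * PostgreSQL 9.0.3
--     Notes:
--         * Useful to bypass weak web application firewalls that do not unicode URL-decode the request before processing it through their ruleset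
--     >>> tamper('SELECT FIELD%20FROM TABLE')
--     '%u0053%u0045%u004C%u0045%u0043%u0054%u0020%u0046%u0049%u0045%u004C%u0044%u0020%u0046%u0052%u004F%u004D%u0020%u0054%u0041%u0042%u004C%u0045'
--     """
--
--     retVal = payload
--
--     if payload:
--         retVal = ""
--         i = 0
--
--         while i < len(payload):
--             if payload[i] == '%' and (i < len(payload) - 2) and payload[i + 1:i + 2] in string.hexdigits and payload[i + 2:i + 3] in string.hexdigits:
--                 retVal += "%%u00%s" % payload[i + 1:i + 3]
--                 i += 3
--             else:
--                 retVal += '%%u%.4X' % ord(payload[i])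
--                 i += 1
--
--     return retVal
-- ===== SOURCE B (Python) =====
-- import re
--
-- _TOKEN = re.compile(r'%([0-9a-fA-F]{2})|(.)', re.DOTALL)
--
--
-- def _encode(m):
--     if m.group(1) is not None:
--         return '%u00' + m.group(1)
--     return '%%u%.4X' % ord(m.group(2))
--
--
-- def charunicodeencode(payload, **kwargs):
--     if not payload:
--         return payload
--     return _TOKEN.sub(_encode, payload)
-- ===== Notes on version B (the rewrite author's own statement) =====
-- stated objective: idiomatic
-- what changed: Replaced the manual variable-step index/while loop with quadratic string concatenation and substring-in-hexdigits tests by a single compiled re.sub over the whole payload whose alternation pattern %([0-9a-fA-F]{2})|(.) drives the scanning and a replacer emits each token's encoding.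
import Mathlib
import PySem

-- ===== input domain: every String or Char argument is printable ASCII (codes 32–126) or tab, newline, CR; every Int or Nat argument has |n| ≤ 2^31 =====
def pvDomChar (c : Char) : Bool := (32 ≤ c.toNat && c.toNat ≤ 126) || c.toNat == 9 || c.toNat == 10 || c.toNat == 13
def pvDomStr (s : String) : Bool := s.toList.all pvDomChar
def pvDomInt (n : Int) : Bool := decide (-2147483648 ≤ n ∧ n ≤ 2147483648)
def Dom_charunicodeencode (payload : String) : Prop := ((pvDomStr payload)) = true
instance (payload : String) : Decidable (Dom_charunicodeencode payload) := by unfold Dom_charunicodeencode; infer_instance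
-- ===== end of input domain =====

-- B replaces A's manual variable-step index/while loop with one regex-alternation-driven re.sub scan; same output, idiomatic.

-- ===== PORT A =====
-- string.hexdigits
def pvHexdigits : List Char := "0123456789abcdefABCDEF".toList

-- '%.4X' % n, exact for n < 0x10000 (every admitted character has ord ≤ 126)
def pvHexDigitU (n : Nat) : Char := if n < 10 then Char.ofNat (48 + n) else Char.ofNat (55 + n)
def pvHex4 (n : Nat) : List Char :=
  [pvHexDigitU (n / 4096 % 16), pvHexDigitU (n / 256 % 16), pvHexDigitU (n / 16 % 16), pvHexDigitU (n % 16)]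

-- A's while loop: state (retVal, i); fuel = payload length (i strictly increases each pass)
def pvChuLoop (p : List Char) (fuel : Nat) (retVal : List Char) (i : Nat) : List Char :=
  match fuel with
  | 0 => retVal
  | fuel + 1 =>
    if i < p.length then
      if PySem.List.pyGetD p (i : Int) ' ' = '%' ∧ (i : Int) < (p.length : Int) - 2 ∧
         PySem.Chars.isIn (PySem.List.slice p (some ((i : Int) + 1)) (some ((i : Int) + 2))) pvHexdigits = true ∧
         PySem.Chars.isIn (PySem.List.slice p (some ((i : Int) + 2)) (some ((i : Int) + 3))) pvHexdigits = true then
        pvChuLoop p fuel (retVal ++ "%u00".toList ++ PySem.List.slice p (some ((i : Int) + 1)) (some ((i : Int) + 3))) (i + 3)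
      else
        pvChuLoop p fuel (retVal ++ "%u".toList ++ pvHex4 (PySem.List.pyGetD p (i : Int) ' ').toNat) (i + 1)
    else retVal

def charunicodeencode (payload : String) : String :=
  if payload.toList = [] then payload
  else String.ofList (pvChuLoop payload.toList payload.toList.length [] 0)

-- ===== PORT B =====
-- the regex character class [0-9a-fA-F]
def pvIsHex (c : Char) : Bool := ('0' ≤ c && c ≤ '9') || ('a' ≤ c && c ≤ 'f') || ('A' ≤ c && c ≤ 'F')

-- the re.sub scan: at each position try the alternative %([0-9a-fA-F]{2}), else (.); the replacer is inlined
def pvAltGo : List Char → List Char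
  | '%' :: a :: b :: rest =>
    if pvIsHex a && pvIsHex b then "%u00".toList ++ [a, b] ++ pvAltGo rest
    else "%u".toList ++ pvHex4 ('%'.toNat) ++ pvAltGo (a :: b :: rest)
  | c :: rest => "%u".toList ++ pvHex4 c.toNat ++ pvAltGo rest
  | [] => []

def charunicodeencode_alt (payload : String) : String :=
  if payload.toList = [] then payload
  else String.ofList (pvAltGo payload.toList)

-- ===== PRECONDITION & SPEC =====
def Spec_charunicodeencode (payload : String) (out : String) : Prop := out = charunicodeencode_alt payload
instance (payload : String) (out : String) : Decidable (Spec_charunicodeencode payload out) := by unfold Spec_charunicodeencode; infer_instance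

-- ===== CLAIM (what is proved, stated in full; the proofs are below) =====
def Claim_equal_charunicodeencode : Prop := ∀ (payload : String), Dom_charunicodeencode payload → Spec_charunicodeencode payload (charunicodeencode payload)

-- ===== LEMMAS AND PROOFS =====

-- 'c in string.hexdigits' for a single character is exactly the regex class [0-9a-fA-F]
lemma pv_isIn_singleton_hex (c : Char) : PySem.Chars.isIn [c] pvHexdigits = pvIsHex c := by
  have h : PySem.Chars.isIn [c] pvHexdigits = true ↔ pvIsHex c = true := by
    rw [PySem.Chars.isIn_iff_infix, List.singleton_infix_iff]
    constructor
    · intro h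
      simp only [pvHexdigits] at h
      simp at h
      rcases h with rfl|rfl|rfl|rfl|rfl|rfl|rfl|rfl|rfl|rfl|rfl|rfl|rfl|rfl|rfl|rfl|rfl|rfl|rfl|rfl|rfl|rfl <;> decide
    · intro h
      have hc : Char.ofNat c.toNat = c := Char.ofNat_toNat c
      have hn : (48 ≤ c.toNat ∧ c.toNat ≤ 57) ∨ (97 ≤ c.toNat ∧ c.toNat ≤ 102) ∨
          (65 ≤ c.toNat ∧ c.toNat ≤ 70) := by
        simp only [pvIsHex, Bool.or_eq_true, Bool.and_eq_true, decide_eq_true_eq, Char.le_def,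
          UInt32.le_iff_toNat_le] at h
        have e0 : ('0' : Char).val.toNat = 48 := by decide
        have e9 : ('9' : Char).val.toNat = 57 := by decide
        have ea : ('a' : Char).val.toNat = 97 := by decide
        have ef : ('f' : Char).val.toNat = 102 := by decide
        have eA : ('A' : Char).val.toNat = 65 := by decide
        have eF : ('F' : Char).val.toNat = 70 := by decide
        have ec : c.toNat = c.val.toNat := rfl
        rw [e0, e9, ea, ef, eA, eF] at h
        rw [ec]
        omega
      rw [← hc]
      set n := c.toNat with hdef
      clear_value n
      rcases hn with ⟨h1, h2⟩ | ⟨h1, h2⟩ | ⟨h1, h2⟩ <;> interval_cases n <;> decide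
  rcases Bool.eq_false_or_eq_true (pvIsHex c) with hb | hb <;>
    simp [hb] at h ⊢ <;> simp [h]

-- the (.) alternative of the regex fires on any character other than '%'
lemma pv_altGo_cons_ne (c : Char) (rest : List Char) (h : c ≠ '%') :
    pvAltGo (c :: rest) = "%u".toList ++ pvHex4 c.toNat ++ pvAltGo rest := by
  match rest with
  | [] => simp [pvAltGo]
  | [a] => simp [pvAltGo]
  | a :: b :: r =>
    rw [pvAltGo]
    intro _ _ _ hc _
    exact h hc

-- loop invariant: A's while loop from position i appends exactly B's scan of the remaining suffix
lemma pv_chu_eq (p : List Char) (fuel : Nat) : ∀ (i : Nat) (acc : List Char), p.length ≤ i + fuel →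
    pvChuLoop p fuel acc i = acc ++ pvAltGo (p.drop i) := by
  induction fuel with
  | zero =>
    intro i acc h
    have hd : p.drop i = [] := List.drop_eq_nil_of_le (by omega)
    simp [pvChuLoop, hd, pvAltGo]
  | succ fuel ih =>
    intro i acc h
    by_cases hi : i < p.length
    · have hget : PySem.List.pyGetD p (i : Int) ' ' = p[i] := by
        simp [PySem.List.pyGetD, hi]
      have hdrop : p.drop i = p[i] :: p.drop (i + 1) := List.drop_eq_getElem_cons hi
      by_cases h2 : i + 2 < p.length
      · have hd1 : p.drop (i + 1) = p[i + 1] :: p.drop (i + 2) := List.drop_eq_getElem_cons (by omega)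
        have hd2 : p.drop (i + 2) = p[i + 2] :: p.drop (i + 3) := List.drop_eq_getElem_cons (by omega)
        have e1 : ((i : Int) + 1) = ((i + 1 : Nat) : Int) := by push_cast; ring
        have e2 : ((i : Int) + 2) = ((i + 2 : Nat) : Int) := by push_cast; ring
        have e3 : ((i : Int) + 3) = ((i + 3 : Nat) : Int) := by push_cast; ring
        have hs1 : PySem.List.slice p (some ((i : Int) + 1)) (some ((i : Int) + 2)) = [p[i + 1]] := by
          rw [e1, e2, PySem.List.slice_natCast]
          have ht : i + 2 - (i + 1) = 1 := by omega
          rw [ht, hd1]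
          rfl
        have hs2 : PySem.List.slice p (some ((i : Int) + 2)) (some ((i : Int) + 3)) = [p[i + 2]] := by
          rw [e2, e3, PySem.List.slice_natCast]
          have ht : i + 3 - (i + 2) = 1 := by omega
          rw [ht, hd2]
          rfl
        have hs3 : PySem.List.slice p (some ((i : Int) + 1)) (some ((i : Int) + 3)) = [p[i + 1], p[i + 2]] := by
          rw [e1, e3, PySem.List.slice_natCast]
          have ht : i + 3 - (i + 1) = 2 := by omega
          rw [ht, hd1, hd2]
          rfl
        by_cases hc : p[i] = '%'
        · by_cases hx : pvIsHex p[i + 1] && pvIsHex p[i + 2]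
          · rw [pvChuLoop]
            rw [if_pos hi, if_pos ⟨by rw [hget, hc], by omega,
              by rw [hs1, pv_isIn_singleton_hex]; exact (Bool.and_eq_true _ _).mp hx |>.1,
              by rw [hs2, pv_isIn_singleton_hex]; exact (Bool.and_eq_true _ _).mp hx |>.2⟩]
            rw [ih (i + 3) _ (by omega), hs3, hdrop, hd1, hd2, hc, pvAltGo, if_pos hx]
            simp
          · rw [pvChuLoop]
            rw [if_pos hi, if_neg (by
              intro hcond
              rcases hcond with ⟨_, _, hA, hB⟩
              rw [hs1, pv_isIn_singleton_hex] at hA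
              rw [hs2, pv_isIn_singleton_hex] at hB
              exact hx (by rw [hA, hB]; rfl))]
            rw [ih (i + 1) _ (by omega), hget, hdrop, hd1, hd2, hc, pvAltGo, if_neg hx]
            simp
        · rw [pvChuLoop]
          rw [if_pos hi, if_neg (by intro hcond; exact hc (hget ▸ hcond.1))]
          rw [ih (i + 1) _ (by omega), hget, hdrop, pv_altGo_cons_ne _ _ hc]
          simp
      · -- fewer than two characters after position i: the Int bound i < len - 2 fails, A emits one char
        rw [pvChuLoop]
        rw [if_pos hi, if_neg (by intro hcond; have := hcond.2.1; push_cast at this; omega)]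
        rw [ih (i + 1) _ (by omega), hget, hdrop]
        by_cases hc : p[i] = '%'
        · have hlen : (p.drop (i + 1)).length ≤ 1 := by simp; omega
          match hm : p.drop (i + 1) with
          | [] => rw [hc]; simp [pvAltGo]
          | [x] => rw [hc]; simp [pvAltGo]
          | x :: y :: r => rw [hm] at hlen; simp at hlen
        · rw [pv_altGo_cons_ne _ _ hc]
          simp
    · have hd : p.drop i = [] := List.drop_eq_nil_of_le (by omega)
      rw [pvChuLoop]
      rw [if_neg hi, hd]
      simp [pvAltGo]

-- ===== VERDICT (by name: the statement is the Claim_ definition above) =====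
theorem charunicodeencode_spec : Claim_equal_charunicodeencode := by
  intro payload _
  unfold Spec_charunicodeencode charunicodeencode charunicodeencode_alt
  by_cases hp : payload.toList = []
  · simp [hp]
  · rw [if_neg hp, if_neg hp]
    rw [pv_chu_eq payload.toList payload.toList.length 0 [] (by omega)]
    simp
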